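-- pv_equiv track=rewrite | github.com/JanKaczmarski/agh-wdi | zestaw-3/zadanie3-2.py | cyfry
-- ===== SOURCE A (Python) =====
-- def cyfry(n):
--     sol = ""
--     n = str(n)
--
--     for digit in n:
--         if digit not in sol:
--             sol += digit
--
--     sol = list(sol)
--     sol.sort()
--     return sol
-- ===== SOURCE B (Python) =====
-- def cyfry(n):
--     res = []
--     prev = None
--     for ch in sorted(str(n)):
--         if ch != prev:
--             res.append(ch)
--             prev = ch
--     return res
-- ===== Notes on version B (the rewrite author's own statement) =====
-- stated objective: alternative
-- what changed: A deduplicates characters by first occurrence with a linear membership scan while building the string and sorts afterwards; B sorts all characters of str(n) first and removes adjacent duplicates in a single pass with a prev tracker.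
import Mathlib
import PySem

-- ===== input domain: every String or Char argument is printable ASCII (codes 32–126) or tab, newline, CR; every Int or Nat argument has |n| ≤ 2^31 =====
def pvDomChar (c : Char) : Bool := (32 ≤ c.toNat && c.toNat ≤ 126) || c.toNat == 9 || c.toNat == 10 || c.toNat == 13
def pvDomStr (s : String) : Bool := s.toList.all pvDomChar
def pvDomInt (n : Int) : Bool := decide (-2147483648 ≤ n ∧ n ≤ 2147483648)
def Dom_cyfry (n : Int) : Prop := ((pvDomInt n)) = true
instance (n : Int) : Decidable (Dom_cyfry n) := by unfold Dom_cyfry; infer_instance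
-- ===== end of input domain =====

-- B sorts str(n) first and deduplicates adjacent equal characters in one pass, instead of
-- A's first-occurrence dedup followed by a sort; objective: alternative decomposition.

-- ===== PORT A =====
-- A: build sol by appending each char of str(n) not already in sol, then list(sol).sort()
def cyfry (n : Int) : List String :=
  let s := PySem.Int.toChars n
  let sol := s.foldl (fun acc c => if c ∈ acc then acc else acc ++ [c]) ([] : List Char)
  -- list(sol) turns each char into a 1-char string; sol.sort() sorts those strings
  PySem.List.sorted (sol.map (fun c => String.ofList [c])) (fun x => x) false

-- ===== PORT B =====
-- B: sort the 1-char strings of str(n), then one pass keeping chars that differ from prev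
def cyfry_alt (n : Int) : List String :=
  let t := PySem.List.sorted ((PySem.Int.toChars n).map (fun c => String.ofList [c])) (fun x => x) false
  (t.foldl (fun st ch => if st.2 ≠ some ch then (st.1 ++ [ch], some ch) else st)
     (([], none) : List String × Option String)).1

-- ===== PRECONDITION & SPEC =====
def Spec_cyfry (n : Int) (out : List String) : Prop := out = cyfry_alt n
instance (n : Int) (out : List String) : Decidable (Spec_cyfry n out) := by unfold Spec_cyfry; infer_instance

-- ===== CLAIM (what is proved, stated in full; the proofs are below) =====
def Claim_equal_cyfry : Prop := ∀ (n : Int), Dom_cyfry n → Spec_cyfry n (cyfry n)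

-- ===== LEMMAS AND PROOFS =====

-- A's first-occurrence fold: membership
theorem cyfry_fold_mem (l : List Char) (acc : List Char) (x : Char) :
    x ∈ l.foldl (fun acc c => if c ∈ acc then acc else acc ++ [c]) acc ↔ x ∈ acc ∨ x ∈ l := by
  induction l generalizing acc with
  | nil => simp
  | cons c l ih =>
    simp only [List.foldl_cons]
    by_cases h : c ∈ acc
    · rw [if_pos h, ih]
      simp only [List.mem_cons]
      constructor
      · tauto
      · rintro (hx | rfl | hx) <;> tauto
    · rw [if_neg h, ih]
      simp only [List.mem_append, List.mem_cons]
      tauto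

-- A's first-occurrence fold: no duplicates
theorem cyfry_fold_nodup (l : List Char) (acc : List Char) (h : acc.Nodup) :
    (l.foldl (fun acc c => if c ∈ acc then acc else acc ++ [c]) acc).Nodup := by
  induction l generalizing acc with
  | nil => simpa
  | cons c l ih =>
    simp only [List.foldl_cons]
    by_cases hc : c ∈ acc
    · rw [if_pos hc]; exact ih acc h
    · rw [if_neg hc]
      refine ih _ ?_
      simp [List.nodup_append, h]
      intro a ha h2
      exact hc (h2 ▸ ha)

-- in a strictly increasing list every element is ≤ the last
theorem le_getLast_of_pairwise_lt (l : List String) (h : l.Pairwise (· < ·)) (x : String)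
    (hx : x ∈ l) (m : String) (hm : l.getLast? = some m) : x ≤ m := by
  induction l with
  | nil => simp at hx
  | cons a l ih =>
    cases l with
    | nil =>
      simp at hx hm
      simp [hx, hm]
    | cons b l =>
      rw [List.getLast?_cons_cons] at hm
      rcases List.mem_cons.1 hx with rfl | hx'
      · have hb : m ∈ b :: l := List.mem_of_getLast? hm
        exact le_of_lt ((List.pairwise_cons.1 h).1 m hb)
      · exact ih (List.pairwise_cons.1 h).2 hx' hm

-- B's scan over a ≤-sorted list, from a canonical state (res, res.getLast?)
theorem cyfry_scan_spec (t res : List String)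
    (ht : t.Pairwise (· ≤ ·)) (hres : res.Pairwise (· < ·))
    (hle : ∀ x ∈ res, ∀ y ∈ t, x ≤ y) :
    ((t.foldl (fun st ch => if st.2 ≠ some ch then (st.1 ++ [ch], some ch) else st)
        (res, res.getLast?)).1).Pairwise (· < ·) ∧
    (∀ x, x ∈ (t.foldl (fun st ch => if st.2 ≠ some ch then (st.1 ++ [ch], some ch) else st)
        (res, res.getLast?)).1 ↔ x ∈ res ∨ x ∈ t) := by
  induction t generalizing res with
  | nil =>
    simp only [List.foldl_nil]
    exact ⟨hres, by simp⟩
  | cons ch t ih =>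
    have ht' : t.Pairwise (· ≤ ·) := (List.pairwise_cons.1 ht).2
    have hch : ∀ y ∈ t, ch ≤ y := (List.pairwise_cons.1 ht).1
    simp only [List.foldl_cons]
    by_cases heq : res.getLast? = some ch
    · -- skip: ch equals the last appended element
      have hmem : ch ∈ res := List.mem_of_getLast? heq
      rw [if_neg (not_not_intro heq)]
      have := ih res ht' hres (fun x hx y hy => hle x hx y (List.mem_cons_of_mem _ hy))
      refine ⟨this.1, fun x => ?_⟩
      rw [this.2 x, List.mem_cons]
      constructor
      · tauto
      · rintro (hx | rfl | hx) <;> tauto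
    · -- append ch
      rw [if_pos heq]
      have hlt : ∀ x ∈ res, x < ch := by
        intro x hx
        have hxle : x ≤ ch := hle x hx ch List.mem_cons_self
        rcases lt_or_eq_of_le hxle with h | rfl
        · exact h
        · exfalso
          obtain ⟨m, hm⟩ : ∃ m, res.getLast? = some m := by
            cases hres' : res.getLast? with
            | none => rw [List.getLast?_eq_none_iff.1 hres'] at hx; simp at hx
            | some m => exact ⟨m, rfl⟩
          have h1 : x ≤ m := le_getLast_of_pairwise_lt res hres x hx m hm
          have h3 : m ≤ x := hle m (List.mem_of_getLast? hm) x List.mem_cons_self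
          exact heq (by rw [hm, le_antisymm h1 h3])
      have hres' : (res ++ [ch]).Pairwise (· < ·) := by
        rw [List.pairwise_append]
        exact ⟨hres, by simp, by simpa using hlt⟩
      have hle' : ∀ x ∈ res ++ [ch], ∀ y ∈ t, x ≤ y := by
        intro x hx y hy
        rcases List.mem_append.1 hx with hx | hx
        · exact hle x hx y (List.mem_cons_of_mem _ hy)
        · simp at hx; subst hx; exact hch y hy
      have := ih (res ++ [ch]) ht' hres' hle'
      have hlast : (res ++ [ch]).getLast? = some ch := by simp
      rw [hlast] at this
      refine ⟨this.1, fun x => ?_⟩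
      rw [this.2 x]
      simp only [List.mem_append, List.mem_cons]
      tauto

theorem stringOfList_inj : Function.Injective String.ofList := by
  intro a b h
  simpa using congrArg String.toList h

-- ===== VERDICT (by name: the statement is the Claim_ definition above) =====
theorem cyfry_spec : Claim_equal_cyfry := by
  intro n _
  unfold Spec_cyfry cyfry cyfry_alt
  set chars := PySem.Int.toChars n with hchars
  set l := chars.map (fun c => String.ofList [c]) with hl
  set t := PySem.List.sorted l (fun x => x) false with htdef
  set dd := chars.foldl (fun acc c => if c ∈ acc then acc else acc ++ [c]) ([] : List Char) with hdd
  have ht : t.Pairwise (· ≤ ·) := PySem.List.sorted_pairwise l (fun x => x)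
  have hscan := cyfry_scan_spec t [] ht (by simp) (by simp)
  simp only [List.getLast?_nil] at hscan
  set b := (t.foldl (fun st ch => if st.2 ≠ some ch then (st.1 ++ [ch], some ch) else st)
      (([] : List String), (none : Option String))).1 with hb
  have hbmem : ∀ x, x ∈ b ↔ x ∈ l := by
    intro x
    rw [hscan.2 x]
    simp [htdef, PySem.List.mem_sorted]
  have hbpl : b.Pairwise (· < ·) := hscan.1
  have hbnd : b.Nodup := hbpl.nodup
  have hddnd : dd.Nodup := cyfry_fold_nodup chars [] (by simp)
  have hddmem : ∀ c, c ∈ dd ↔ c ∈ chars := by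
    intro c; rw [hdd, cyfry_fold_mem]; simp
  have hand : (dd.map (fun c => String.ofList [c])).Nodup :=
    hddnd.map (fun a b h => by simpa using stringOfList_inj h)
  have hamem : ∀ x, x ∈ dd.map (fun c => String.ofList [c]) ↔ x ∈ l := by
    intro x
    simp only [hl, List.mem_map]
    exact ⟨fun ⟨c, hc, he⟩ => ⟨c, (hddmem c).1 hc, he⟩,
           fun ⟨c, hc, he⟩ => ⟨c, (hddmem c).2 hc, he⟩⟩
  have hperm : b.Perm (dd.map (fun c => String.ofList [c])) := by
    apply List.perm_of_nodup_nodup_toFinset_eq hbnd hand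
    ext x
    simp only [List.mem_toFinset]
    rw [hbmem x, hamem x]
  exact PySem.List.sorted_eq_of_perm_of_pairwise_lt _ _ _ hperm hbpl
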